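-- pv_equiv track=rewrite | github.com/drgnfrts/IS111 | lt2_answers/q4c.py | find_all_words
-- ===== SOURCE A (Python) =====
-- from itertools import combinations
--
-- def find_all_words(word_list, input_str, step):
--     # Replace the code below with your implementation.
--     r_list = []
--     input_list = []
--     for i in range(len(input_str)):
--         input_list.append(i)
--     for word in word_list:
--         have_combi = False
--         combis = combinations(input_list, len(word))
--         for combi in combis:
--             combi = list(combi)
--             hold = ""
--             for num in combi:
--                 hold += input_str[input_list[num]]
--             if hold == word:
--                 valid = True
--                 for j in range(len(combi) - 1):
--                     if combi[j + 1] - combi[j] < step: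
--                         valid = False
--                 if valid:
--                     have_combi = True
--                     r_list.append(combi)
--         if not have_combi:
--             r_list.append([])
--     return r_list
-- ===== SOURCE B (Python) =====
-- def find_all_words(word_list, input_str, step):
--     # Backtracking over matching positions only: for each word, extend a partial
--     # index list at positions >= last + max(1, step) whose char matches the next
--     # letter; emits index lists in the same lexicographic order as combinations.
--     n = len(input_str)
--     g = max(1, step)
--     out = []
--     for word in word_list:
--         res = []
--         def dfs(pos, start, acc):
--             if pos == len(word):
--                 res.append(acc[:])
--                 return
--             ch = word[pos]
--             for i in range(start, n):
--                 if input_str[i] == ch: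
--                     acc.append(i)
--                     dfs(pos + 1, i + g, acc)
--                     acc.pop()
--         dfs(0, 0, [])
--         if res:
--             out.extend(res)
--         else:
--             out.append([])
--     return out
-- ===== Notes on version B (the rewrite author's own statement) =====
-- stated objective: faster
-- what changed: Replaces the exhaustive scan over all C(n,k) index combinations per word with a backtracking DFS that only extends partial index lists at positions matching the next letter and at least max(1,step) past the previous one, emitting results in the same lexicographic order.
import Mathlib
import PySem

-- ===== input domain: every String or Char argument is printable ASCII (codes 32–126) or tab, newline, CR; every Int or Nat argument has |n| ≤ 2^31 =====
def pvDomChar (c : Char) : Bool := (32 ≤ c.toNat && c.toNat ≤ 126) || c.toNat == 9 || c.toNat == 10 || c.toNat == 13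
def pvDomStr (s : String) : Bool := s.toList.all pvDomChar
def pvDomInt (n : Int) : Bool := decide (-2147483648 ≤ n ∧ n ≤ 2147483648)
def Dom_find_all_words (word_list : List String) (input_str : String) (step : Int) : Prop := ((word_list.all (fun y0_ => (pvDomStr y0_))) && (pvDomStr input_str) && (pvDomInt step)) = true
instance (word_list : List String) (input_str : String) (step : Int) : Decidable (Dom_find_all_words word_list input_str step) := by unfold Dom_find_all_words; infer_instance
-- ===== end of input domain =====

-- B replaces A's exhaustive scan over all C(n,k) index combinations per word by a
-- backtracking search over matching positions only (same results, same order).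

-- ===== PORT A =====
-- port of itertools.combinations(l, k): k-subsequences of l in lexicographic order
def pvCombos : List Int → Nat → List (List Int)
  | _, 0 => [[]]
  | [], _ + 1 => []
  | x :: xs, k + 1 => ((pvCombos xs k).map (fun c => x :: c)) ++ pvCombos xs (k + 1)

-- the one-character string input_str[input_list[num]] appended to hold;
-- both indices are always in range in A (combi ⊆ input_list = range(n)), so the
-- none branches are unreachable
def pvCharAt (cs : List Char) (input_list : List Int) (num : Int) : List Char :=
  match PySem.List.pyGet? input_list num with
  | some j =>
    match PySem.List.pyGet? cs j with
    | some c => [c]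
    | none => []
  | none => []

-- the inner 'valid' loop of A
def pvValid (step : Int) (combi : List Int) : Bool :=
  (List.range (combi.length - 1)).foldl
    (fun valid (j : Nat) =>
      if PySem.List.pyGetD combi ((j : Int) + 1) 0 - PySem.List.pyGetD combi (j : Int) 0 < step
      then false else valid)
    true

def find_all_words (word_list : List String) (input_str : String) (step : Int) : List (List Int) :=
  let input_list : List Int :=
    (List.range input_str.toList.length).foldl (fun (acc : List Int) (i : Nat) => acc ++ [(i : Int)]) []
  word_list.foldl
    (fun r_list word =>
      let combis := pvCombos input_list word.toList.length
      let p := combis.foldl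
        (fun (p : List (List Int) × Bool) combi =>
          let hold := combi.foldl (fun hold num => hold ++ pvCharAt input_str.toList input_list num) []
          if hold = word.toList then
            if pvValid step combi then (p.1 ++ [combi], true) else p
          else p)
        (r_list, false)
      if p.2 = false then p.1 ++ [[]] else p.1)
    []

-- ===== PORT B =====
-- the recursive dfs of B: extend at positions i ∈ [start, n) with cs[i] = next letter
def pvDfs (cs : List Char) (n g : Nat) : List Char → Nat → List (List Int)
  | [], _ => [[]]
  | ch :: rest, start =>
    (List.range' start (n - start)).flatMap
      (fun i =>
        if cs[i]? = some ch then (pvDfs cs n g rest (i + g)).map (fun l => (i : Int) :: l)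
        else [])

def find_all_words_alt (word_list : List String) (input_str : String) (step : Int) : List (List Int) :=
  let cs := input_str.toList
  let n := cs.length
  let g := (max 1 step).toNat   -- max(1, step) ≥ 1, so .toNat is exact
  word_list.foldl
    (fun out word =>
      let res := pvDfs cs n g word.toList 0
      if res = [] then out ++ [[]] else out ++ res)
    []

-- ===== PRECONDITION & SPEC =====
def Spec_find_all_words (word_list : List String) (input_str : String) (step : Int) (out : List (List Int)) : Prop := out = find_all_words_alt word_list input_str step
instance (word_list : List String) (input_str : String) (step : Int) (out : List (List Int)) : Decidable (Spec_find_all_words word_list input_str step out) := by unfold Spec_find_all_words; infer_instance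

-- ===== CLAIM (what is proved, stated in full; the proofs are below) =====
def Claim_equal_find_all_words : Prop := ∀ (word_list : List String) (input_str : String) (step : Int), Dom_find_all_words word_list input_str step → Spec_find_all_words word_list input_str step (find_all_words word_list input_str step)

-- ===== LEMMAS AND PROOFS =====

-- the index list [s, n) as Ints
def pvRng (n s : Nat) : List Int := (List.range' s (n - s)).map Int.ofNat

-- boolean adjacent-gap check, recursive form
def pvAdj (step : Int) : List Int → Bool
  | [] => true
  | [_] => true
  | a :: b :: t => (!(decide (b - a < step))) && pvAdj step (b :: t)

lemma pvAdj_cons (step : Int) (a : Int) (c : List Int) :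
    pvAdj step (a :: c)
      = ((match c.head? with | none => true | some h => !(decide (h - a < step))) && pvAdj step c) := by
  cases c <;> simp [pvAdj]

lemma foldl_range_if_false {p : Nat → Prop} [DecidablePred p] :
    ∀ (m : Nat) (b : Bool),
      (List.range m).foldl (fun v j => if p j then false else v) b
        = (b && decide (∀ j, j < m → ¬ p j)) := by
  intro m
  induction m with
  | zero => intro b; simp
  | succ m ih =>
    intro b
    rw [List.range_succ, List.foldl_append, ih]
    by_cases hm : p m
    · simp only [List.foldl_cons, List.foldl_nil, if_pos hm]
      symm
      simp only [Bool.and_eq_false_iff, decide_eq_false_iff_not, not_forall]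
      right; exact ⟨m, by omega, by simpa using hm⟩
    · simp only [List.foldl_cons, List.foldl_nil, if_neg hm]
      congr 1
      simp only [decide_eq_decide]
      constructor
      · intro h j hj; rcases Nat.lt_succ_iff_lt_or_eq.mp hj with h' | rfl
        · exact h j h'
        · exact hm
      · intro h j hj; exact h j (by omega)

lemma pvAdj_iff (step : Int) : ∀ (c : List Int),
    pvAdj step c = true ↔ ∀ j, j < c.length - 1 → ¬ (c.getD (j+1) 0 - c.getD j 0 < step) := by
  intro c
  match c with
  | [] => simp [pvAdj]
  | [a] => simp [pvAdj]
  | a :: b :: t =>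
    rw [show pvAdj step (a :: b :: t) = ((!(decide (b - a < step))) && pvAdj step (b :: t)) from rfl]
    rw [Bool.and_eq_true]
    rw [pvAdj_iff step (b :: t)]
    constructor
    · rintro ⟨h1, h2⟩ j hj
      cases j with
      | zero => simpa using h1
      | succ j => exact h2 j (by simpa using hj)
    · intro h
      refine ⟨by simpa using h 0 (by simp), fun j hj => h (j+1) (by simp at hj ⊢; omega)⟩

lemma pvValid_eq_pvAdj (step : Int) (c : List Int) :
    pvValid step c = pvAdj step c := by
  unfold pvValid
  rw [foldl_range_if_false]
  rw [Bool.true_and]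
  have key : ∀ j : Nat, PySem.List.pyGetD c ((j : Int) + 1) 0 - PySem.List.pyGetD c (j : Int) 0
      = c.getD (j+1) 0 - c.getD j 0 := by
    intro j
    have h1 : ((j : Int) + 1) = ((j + 1 : Nat) : Int) := by push_cast; ring
    rw [h1, PySem.List.pyGetD_natCast, PySem.List.pyGetD_natCast]
  rcases Bool.eq_false_or_eq_true (pvAdj step c) with h | h <;> rw [h]
  · rw [decide_eq_true_eq]
    intro j hj
    rw [key j]
    exact (pvAdj_iff step c).mp h j hj
  · rw [decide_eq_false_iff_not]
    intro hall
    rw [← Bool.not_eq_true, pvAdj_iff step c] at h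
    exact h (fun j hj => by rw [← key j]; exact hall j hj)

lemma pvHold_eq_flatMap (cs : List Char) (inl : List Int) (c : List Int) :
    c.foldl (fun hold num => hold ++ pvCharAt cs inl num) [] = c.flatMap (pvCharAt cs inl) := by
  simpa using PySem.List.foldl_append_eq_flatMap (g := pvCharAt cs inl) (l := c) (acc := [])

lemma pvCharAt_lt (cs : List Char) (i : Nat) (hi : i < cs.length) :
    pvCharAt cs ((List.range cs.length).map Int.ofNat) (i : Int) = [cs[i]] := by
  unfold pvCharAt
  rw [PySem.List.pyGet?_natCast]
  rw [List.getElem?_map, List.getElem?_range hi]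
  simp only [Option.map_some]
  rw [show (Int.ofNat i) = (i : Int) from rfl, PySem.List.pyGet?_natCast]
  rw [List.getElem?_eq_getElem hi]

lemma sublist_of_mem_pvCombos : ∀ (l : List Int) (k : Nat) (c : List Int),
    c ∈ pvCombos l k → c.Sublist l := by
  intro l
  induction l with
  | nil =>
    intro k c hc
    cases k with
    | zero => simp [pvCombos] at hc; simp [hc]
    | succ k => simp [pvCombos] at hc
  | cons x xs ih =>
    intro k c hc
    cases k with
    | zero => simp [pvCombos] at hc; simp [hc]
    | succ k =>
      rw [pvCombos, List.mem_append] at hc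
      rcases hc with hc | hc
      · obtain ⟨c', hc', rfl⟩ := List.mem_map.mp hc
        exact (ih k c' hc').cons₂ x
      · exact (ih (k+1) c hc).cons x

lemma mem_pvRng {n s : Nat} {x : Int} (hx : x ∈ pvRng n s) :
    ∃ j : Nat, x = (j : Int) ∧ s ≤ j ∧ j < n := by
  unfold pvRng at hx
  obtain ⟨j, hj, rfl⟩ := List.mem_map.mp hx
  rw [List.mem_range'_1] at hj
  exact ⟨j, rfl, hj.1, by omega⟩

lemma pvRng_cons {n s : Nat} (h : s < n) : pvRng n s = (s : Int) :: pvRng n (s + 1) := by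
  unfold pvRng
  rw [show n - s = (n - (s+1)) + 1 by omega, List.range'_succ]
  rfl

lemma pvRng_nil {n s : Nat} (h : n ≤ s) : pvRng n s = [] := by
  unfold pvRng
  rw [show n - s = 0 by omega]
  rfl

lemma pvCombos_filter_head_self (n : Nat) (Q : List Int → Bool) (k m : Nat) :
    (pvCombos (pvRng n m) k).filter
        (fun c => (match c.head? with | none => true | some h => decide ((m : Int) ≤ h)) && Q c)
      = (pvCombos (pvRng n m) k).filter Q := by
  apply List.filter_congr
  intro c hc
  have hsub := sublist_of_mem_pvCombos _ _ _ hc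
  cases hhead : c.head? with
  | none => simp
  | some h =>
    have hmem : h ∈ c := List.mem_of_mem_head? hhead
    obtain ⟨j, rfl, hj1, hj2⟩ := mem_pvRng (hsub.subset hmem)
    have : ((m : Int) ≤ (j : Int)) := by exact_mod_cast hj1
    simp [this]

-- narrowing: among combinations drawn from [s, n), those whose first index is ≥ m
-- are exactly the combinations drawn from [m, n), in the same order
lemma pvCombos_filter_head (n : Nat) (Q : List Int → Bool) :
    ∀ (d k s m : Nat), m - s ≤ d → s ≤ m →
      (pvCombos (pvRng n s) k).filter
          (fun c => (match c.head? with | none => true | some h => decide ((m : Int) ≤ h)) && Q c)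
        = (pvCombos (pvRng n m) k).filter Q := by
  intro d
  induction d with
  | zero =>
    intro k s m hd hsm
    have : s = m := by omega
    subst this
    exact pvCombos_filter_head_self n Q k s
  | succ d ihd =>
    intro k s m hd hsm
    rcases Nat.eq_or_lt_of_le hsm with rfl | hlt
    · exact pvCombos_filter_head_self n Q k s
    · by_cases hn : s < n
      · rw [pvRng_cons hn]
        cases k with
        | zero => simp only [pvCombos]; rfl
        | succ k =>
          rw [pvCombos]
          rw [List.filter_append, List.filter_map]
          have h1 : ((pvCombos (pvRng n (s+1)) k).filter
              ((fun c => (match c.head? with | none => true | some h => decide ((m : Int) ≤ h)) && Q c) ∘ (fun c => (s:Int) :: c))) = [] := by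
            apply List.filter_eq_nil_iff.mpr
            intro c _
            simp only [Function.comp_apply, List.head?_cons]
            have : ¬ ((m : Int) ≤ (s : Int)) := by exact_mod_cast by omega
            simp [this]
          rw [h1, List.map_nil, List.nil_append]
          exact ihd (k+1) (s+1) m (by omega) (by omega)
      · rw [pvRng_nil (by omega : n ≤ s), pvRng_nil (by omega : n ≤ m)]
        cases k with
        | zero => simp only [pvCombos]; rfl
        | succ k => simp only [pvCombos]; rfl

-- the heart: B's dfs enumerates exactly A's surviving combinations, in order
lemma pvDfs_eq (cs : List Char) (step : Int) :
    ∀ (w : List Char) (s : Nat),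
      pvDfs cs cs.length (max 1 step).toNat w s
        = (pvCombos (pvRng cs.length s) w.length).filter
            (fun c => decide (c.flatMap (pvCharAt cs ((List.range cs.length).map Int.ofNat)) = w)
                        && pvAdj step c) := by
  intro w
  induction w with
  | nil =>
    intro s
    simp [pvDfs, pvCombos, pvAdj, List.filter]
  | cons ch rest IH =>
    have hg1 : (1 : Int) ≤ max 1 step := le_max_left _ _
    have hg : 1 ≤ (max 1 step).toNat := by omega
    have hgc : (((max 1 step).toNat : Int)) = max 1 step := Int.toNat_of_nonneg (by omega)
    suffices H : ∀ d s, cs.length - s ≤ d →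
        pvDfs cs cs.length (max 1 step).toNat (ch :: rest) s
          = (pvCombos (pvRng cs.length s) (ch :: rest).length).filter
              (fun c => decide (c.flatMap (pvCharAt cs ((List.range cs.length).map Int.ofNat)) = (ch :: rest))
                          && pvAdj step c) by
      exact fun s => H cs.length s (by omega)
    intro d
    induction d with
    | zero =>
      intro s hs
      rw [pvRng_nil (by omega : cs.length ≤ s)]
      show (List.range' s (cs.length - s)).flatMap _ = _
      rw [show cs.length - s = 0 by omega]
      simp [pvCombos]
    | succ d ihd =>
      intro s hs
      by_cases hn : s < cs.length
      · -- expand one position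
        have hlen : (ch :: rest).length = rest.length + 1 := rfl
        rw [hlen, pvRng_cons hn, pvCombos, List.filter_append, List.filter_map]
        show (List.range' s (cs.length - s)).flatMap _ = _
        rw [show cs.length - s = (cs.length - (s+1)) + 1 by omega, List.range'_succ, List.flatMap_cons]
        have tailEq : (List.range' (s+1) (cs.length - (s+1))).flatMap
            (fun i => if cs[i]? = some ch
              then (pvDfs cs cs.length (max 1 step).toNat rest (i + (max 1 step).toNat)).map (fun l => (i : Int) :: l)
              else [])
            = pvDfs cs cs.length (max 1 step).toNat (ch :: rest) (s+1) := rfl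
        rw [tailEq, ihd (s+1) (by omega), hlen]
        congr 1
        -- head contribution
        have hcs : cs[s]? = some cs[s] := List.getElem?_eq_getElem hn
        by_cases hch : cs[s] = ch
        · rw [if_pos (by rw [hcs, hch])]
          have hmemhead : ∀ c ∈ pvCombos (pvRng cs.length (s+1)) rest.length,
              ∀ h ∈ c.head?, ((s:Int) + 1) ≤ h := by
            intro c hc h hh
            have hsub := sublist_of_mem_pvCombos _ _ _ hc
            obtain ⟨j, rfl, hj1, hj2⟩ := mem_pvRng (hsub.subset (List.mem_of_mem_head? hh))
            exact_mod_cast by omega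
          have hcongr : (pvCombos (pvRng cs.length (s+1)) rest.length).filter
                ((fun c => decide (c.flatMap (pvCharAt cs ((List.range cs.length).map Int.ofNat)) = (ch :: rest))
                            && pvAdj step c) ∘ (fun c => (s:Int) :: c))
              = (pvCombos (pvRng cs.length (s+1)) rest.length).filter
                (fun c => (match c.head? with
                    | none => true
                    | some h => decide (((s + (max 1 step).toNat : Nat) : Int) ≤ h))
                  && (decide (c.flatMap (pvCharAt cs ((List.range cs.length).map Int.ofNat)) = rest)
                        && pvAdj step c)) := by
            apply List.filter_congr
            intro c hc
            simp only [Function.comp_apply, List.flatMap_cons, pvCharAt_lt cs s hn, hch,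
              List.cons_append, List.nil_append, pvAdj_cons, List.cons.injEq]
            have hhead := hmemhead c hc
            cases hh : c.head? with
            | none => simp
            | some h =>
              have hb : ((s:Int) + 1) ≤ h := hhead h (by rw [hh]; rfl)
              have hiff : (¬ (h - (s:Int) < step)) ↔ (((s + (max 1 step).toNat : Nat) : Int) ≤ h) := by
                push_cast [hgc]
                rcases le_or_gt step 1 with h1 | h1
                · rw [max_eq_left h1]; omega
                · rw [max_eq_right (by omega : (1:Int) ≤ step)]; omega
              have hd2 : (!(decide (h - (s:Int) < step))) = decide (((s + (max 1 step).toNat : Nat) : Int) ≤ h) := by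
                rw [← decide_not, decide_eq_decide]; exact hiff
              simp [hd2, Bool.and_comm, Bool.and_left_comm]
              rw [Bool.and_assoc]
          rw [hcongr,
            pvCombos_filter_head cs.length _ (s + (max 1 step).toNat) rest.length (s+1) (s + (max 1 step).toNat)
              (by omega) (by omega),
            ← IH (s + (max 1 step).toNat)]
        · rw [if_neg (by rw [hcs]; simpa using hch)]
          symm
          rw [List.map_eq_nil_iff]
          apply List.filter_eq_nil_iff.mpr
          intro c _
          simp only [Function.comp_apply, List.flatMap_cons, pvCharAt_lt cs s hn,
            List.cons_append, List.nil_append, Bool.and_eq_true, decide_eq_true_eq]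
          rintro ⟨h1, -⟩
          exact hch (by injection h1)
      · rw [pvRng_nil (by omega : cs.length ≤ s)]
        show (List.range' s (cs.length - s)).flatMap _ = _
        rw [show cs.length - s = 0 by omega]
        simp [pvCombos]

lemma foldl_pair_filter (P : List Int → Bool) :
    ∀ (l : List (List Int)) (r0 : List (List Int)) (b0 : Bool),
      (l.foldl (fun (p : List (List Int) × Bool) c => if P c then (p.1 ++ [c], true) else p) (r0, b0))
        = (r0 ++ l.filter P, b0 || !(l.filter P).isEmpty) := by
  intro l
  induction l with
  | nil => intro r0 b0; simp
  | cons c l ih =>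
    intro r0 b0
    by_cases hc : P c
    · simp [hc, ih]
    · simp [hc, ih]

lemma pvRng_zero (n : Nat) : pvRng n 0 = (List.range n).map Int.ofNat := by
  unfold pvRng
  rw [Nat.sub_zero, List.range_eq_range']

-- ===== VERDICT (by name: the statement is the Claim_ definition above) =====
theorem find_all_words_spec : Claim_equal_find_all_words := by
  unfold Claim_equal_find_all_words Spec_find_all_words
  intro word_list input_str step _
  unfold find_all_words find_all_words_alt
  have hinl : (List.range input_str.toList.length).foldl (fun (acc : List Int) (i : Nat) => acc ++ [(i : Int)]) ([] : List Int)
      = (List.range input_str.toList.length).map Int.ofNat := by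
    simpa using PySem.List.foldl_append_singleton_eq_map
      (f := fun i : Nat => (i : Int)) (l := List.range input_str.toList.length) (acc := [])
  rw [hinl]
  apply List.foldl_ext
  intro r word _
  have hstep : (fun (p : List (List Int) × Bool) combi =>
        if (combi.foldl (fun hold num => hold ++ pvCharAt input_str.toList ((List.range input_str.toList.length).map Int.ofNat) num) []) = word.toList then
          if pvValid step combi then (p.1 ++ [combi], true) else p
        else p)
      = (fun (p : List (List Int) × Bool) c =>
          if (decide (c.flatMap (pvCharAt input_str.toList ((List.range input_str.toList.length).map Int.ofNat)) = word.toList)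
               && pvAdj step c) then (p.1 ++ [c], true) else p) := by
    funext p c
    rw [pvHold_eq_flatMap, pvValid_eq_pvAdj]
    by_cases h1 : c.flatMap (pvCharAt input_str.toList ((List.range input_str.toList.length).map Int.ofNat)) = word.toList <;>
      by_cases h2 : pvAdj step c = true <;> simp_all
  dsimp only
  rw [hstep, foldl_pair_filter]
  rw [pvDfs_eq input_str.toList step word.toList 0, pvRng_zero]
  cases hF : (pvCombos ((List.range input_str.toList.length).map Int.ofNat) word.toList.length).filter
      (fun c => decide (c.flatMap (pvCharAt input_str.toList ((List.range input_str.toList.length).map Int.ofNat)) = word.toList)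
                  && pvAdj step c) with
  | nil => simp
  | cons a t => simp
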